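-- pv_equiv track=rewrite | github.com/lkhagvadorj-amp/atcoder | AtCoderBeginnerContest283/d-scope.py | check
-- ===== SOURCE A (Python) =====
-- def check(S):
--     box = set()
--     for si in S:
--         if si in "abcdefghijklmnopqrstuvwxyz":
--             if si in box:
--                 return False
--             box.add(si)
--         elif si == ")":
--             box.clear()
--     return True
-- ===== SOURCE B (Python) =====
-- def check(S):
--     # A ')' closes the current scope, so letters only clash within the chunk
--     # between consecutive ')'s: split once and test each chunk for duplicates.
--     for seg in S.split(')'):
--         letters = [c for c in seg if 'a' <= c <= 'z']
--         if len(letters) != len(set(letters)):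
--             return False
--     return True
-- ===== Notes on version B (the rewrite author's own statement) =====
-- stated objective: simpler
-- what changed: Replaces the streaming loop that maintains and clears one running set with a split of S on ')' into scope chunks and a per-chunk duplicate test on its lowercase letters (len vs len(set)).
import Mathlib
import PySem

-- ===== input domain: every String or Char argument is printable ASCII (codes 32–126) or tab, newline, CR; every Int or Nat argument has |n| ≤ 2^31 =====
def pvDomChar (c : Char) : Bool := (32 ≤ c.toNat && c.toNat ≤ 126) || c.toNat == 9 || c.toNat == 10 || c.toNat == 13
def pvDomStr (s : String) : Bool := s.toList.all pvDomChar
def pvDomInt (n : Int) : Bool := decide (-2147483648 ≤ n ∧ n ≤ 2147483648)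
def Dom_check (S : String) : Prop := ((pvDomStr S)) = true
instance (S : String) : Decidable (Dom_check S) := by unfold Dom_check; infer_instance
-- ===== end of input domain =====

-- B splits S on ')' into scope chunks and tests each chunk's lowercase letters for
-- duplicates, instead of A's streaming loop over one running set cleared on ')'.

-- ===== PORT A =====
def pvLower : List Char := "abcdefghijklmnopqrstuvwxyz".toList

-- for si in S: … (early return False modelled by the Bool result)
def checkLoop : List Char → PySem.Set Char → Bool
  | [], _ => true
  | c :: rest, box =>
    if PySem.Chars.isIn [c] pvLower then        -- si in "abcdefghijklmnopqrstuvwxyz"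
      if PySem.Set.contains box c then false    -- si in box → return False
      else checkLoop rest (PySem.Set.add box c) -- box.add(si)
    else if c = ')' then checkLoop rest PySem.Set.empty  -- box.clear()
    else checkLoop rest box

def check (S : String) : Bool := checkLoop S.toList PySem.Set.empty

-- ===== PORT B =====
def check_alt (S : String) : Bool :=
  ((PySem.Str.split? S ")").getD []).all fun seg =>
    let letters := seg.toList.filter (fun c => 'a' ≤ c && c ≤ 'z')
    (letters.length : Int) == PySem.Set.len (PySem.Set.ofList letters)

-- ===== PRECONDITION & SPEC =====
def Spec_check (S : String) (out : Bool) : Prop := out = check_alt S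
instance (S : String) (out : Bool) : Decidable (Spec_check S out) := by unfold Spec_check; infer_instance

-- ===== CLAIM (what is proved, stated in full; the proofs are below) =====
def Claim_equal_check : Prop := ∀ (S : String), Dom_check S → Spec_check S (check S)

-- ===== LEMMAS AND PROOFS =====

-- simple recursive characterisation of splitting on ')'
def splitP : List Char → List (List Char)
  | [] => [[]]
  | c :: cs =>
    let r := splitP cs
    if c = ')' then [] :: r else (c :: r.headI) :: r.tail

theorem splitP_ne_nil (l : List Char) : splitP l ≠ [] := by
  cases l <;> simp [splitP]; split <;> simp

theorem splitP_head_tail (l : List Char) :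
    (splitP l).headI :: (splitP l).tail = splitP l := by
  cases h : splitP l with
  | nil => exact absurd h (splitP_ne_nil l)
  | cons a as => simp

theorem splitOn_go_eq (l : List Char) : ∀ (fuel : Nat) (cur : List Char) (acc : List (List Char)),
    l.length ≤ fuel →
    PySem.Chars.splitOn.go [')'] fuel l cur acc =
      acc.reverse ++ (cur.reverse ++ (splitP l).headI) :: (splitP l).tail := by
  induction l with
  | nil =>
    intro fuel cur acc _
    cases fuel <;> simp [PySem.Chars.splitOn.go, splitP]
  | cons c rest ih =>
    intro fuel cur acc hfuel
    cases fuel with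
    | zero => simp at hfuel
    | succ f =>
      have hstep : PySem.Chars.splitOn.go [')'] (f+1) (c :: rest) cur acc =
          (if List.isPrefixOf [')'] (c :: rest) then
            PySem.Chars.splitOn.go [')'] f rest [] (cur.reverse :: acc)
           else PySem.Chars.splitOn.go [')'] f rest (c :: cur) acc) := by
        conv_lhs => rw [PySem.Chars.splitOn.go]
        simp only [List.drop_succ_cons, List.drop_zero, List.length_cons, List.length_nil]
      by_cases hc : c = ')'
      · subst hc
        rw [hstep, if_pos (by simp)]
        rw [ih f [] (cur.reverse :: acc) (by simpa using hfuel)]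
        have hsp : splitP (')' :: rest) = [] :: splitP rest := by simp [splitP]
        rw [hsp]
        conv_rhs => rw [← splitP_head_tail rest]
        simp
      · have hpre : List.isPrefixOf [')'] (c :: rest) = false := by
          simp [List.isPrefixOf]; exact fun h => hc h.symm
        rw [hstep, hpre, if_neg (by simp)]
        rw [ih f (c :: cur) acc (by simpa using hfuel)]
        simp [splitP, hc]

theorem splitOn_eq_splitP (l : List Char) :
    PySem.Chars.splitOn l [')'] = splitP l := by
  rw [PySem.Chars.splitOn, splitOn_go_eq l (l.length + 1) [] [] (by omega)]
  simpa using splitP_head_tail l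

-- membership in the lowercase alphabet is the range test B uses
theorem pvLower_eq : pvLower = ['a', 'b', 'c', 'd', 'e', 'f', 'g', 'h', 'i', 'j', 'k', 'l', 'm', 'n', 'o', 'p', 'q', 'r', 's', 't', 'u', 'v', 'w', 'x', 'y', 'z'] := by rfl

theorem mem_pvLower (c : Char) : c ∈ pvLower ↔ ('a' ≤ c && c ≤ 'z') = true := by
  rw [pvLower_eq]
  constructor
  · intro h
    fin_cases h <;> decide
  · intro h
    have h1 : 97 ≤ c.toNat := by
      have := of_decide_eq_true ((Bool.and_eq_true _ _).mp h).1
      exact UInt32.le_iff_toNat_le.mp (Char.le_def.mp this)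
    have h2 : c.toNat ≤ 122 := by
      have := of_decide_eq_true ((Bool.and_eq_true _ _).mp h).2
      exact UInt32.le_iff_toNat_le.mp (Char.le_def.mp this)
    have hofn : Char.ofNat c.toNat = c := Char.ofNat_toNat c
    interval_cases h : c.toNat <;> (rw [← hofn]; decide)

theorem isIn_single_lower (c : Char) :
    PySem.Chars.isIn [c] pvLower = ('a' ≤ c && c ≤ 'z') := by
  by_cases h : ('a' ≤ c && c ≤ 'z') = true
  · rw [h, PySem.Chars.isIn_iff_infix]
    obtain ⟨sfx, t, hst⟩ := List.append_of_mem ((mem_pvLower c).mpr h)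
    exact ⟨sfx, t, by simp [hst]⟩
  · rw [Bool.not_eq_true] at h
    rw [h, ← Bool.not_eq_true, PySem.Chars.isIn_iff_infix]
    intro hinf
    exact absurd ((mem_pvLower c).mp (hinf.subset (by simp))) (by simp [h])

-- the letters of a chunk
def lettersOf (l : List Char) : List Char := l.filter (fun c => 'a' ≤ c && c ≤ 'z')

-- duplicate test inside one chunk, seeded with a set
def segCheck : List Char → PySem.Set Char → Bool
  | [], _ => true
  | c :: rest, box =>
    if ('a' ≤ c && c ≤ 'z') then
      if PySem.Set.contains box c then false
      else segCheck rest (PySem.Set.add box c)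
    else segCheck rest box

theorem segCheck_iff (seg : List Char) : ∀ box : PySem.Set Char,
    segCheck seg box = true ↔
      (lettersOf seg).Nodup ∧ ∀ c ∈ lettersOf seg, c ∉ box := by
  induction seg with
  | nil => intro box; simp [segCheck, lettersOf]
  | cons c rest ih =>
    intro box
    by_cases hc : ('a' ≤ c && c ≤ 'z') = true
    · have hl : lettersOf (c :: rest) = c :: lettersOf rest :=
        List.filter_cons_of_pos hc
      by_cases hm : c ∈ box
      · have hmc : PySem.Set.contains box c = true := (PySem.Set.contains_iff box c).mpr hm
        simp only [segCheck, hc, if_true, hmc, hl]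
        constructor
        · intro h; exact absurd h (by simp)
        · rintro ⟨-, hall⟩
          exact absurd hm (hall c (List.mem_cons_self))
      · have hmc : PySem.Set.contains box c = false := by
          rw [← Bool.not_eq_true, PySem.Set.contains_iff]; exact hm
        simp only [segCheck, hc, if_true, hmc, Bool.false_eq_true, if_false, hl,
          List.nodup_cons, List.mem_cons]
        rw [ih]
        constructor
        · rintro ⟨hnd, hall⟩
          have hcr : c ∉ lettersOf rest := fun hmem =>
            hall c hmem ((PySem.Set.mem_add box c c).mpr (Or.inr rfl))
          refine ⟨⟨hcr, hnd⟩, ?_⟩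
          rintro x (rfl | hx)
          · exact hm
          · intro hxb
            exact hall x hx ((PySem.Set.mem_add box c x).mpr (Or.inl hxb))
        · rintro ⟨⟨hcr, hnd⟩, hall⟩
          refine ⟨hnd, fun x hx hxadd => ?_⟩
          rcases (PySem.Set.mem_add box c x).mp hxadd with hxb | rfl
          · exact hall x (Or.inr hx) hxb
          · exact hcr hx
    · rw [Bool.not_eq_true] at hc
      have hl : lettersOf (c :: rest) = lettersOf rest :=
        List.filter_cons_of_neg (by simp [hc])
      simp only [segCheck, hc, Bool.false_eq_true, if_false, hl]
      exact ih box

-- the running loop of A, per chunk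
theorem checkLoop_eq_segs (l : List Char) : ∀ box : PySem.Set Char,
    checkLoop l box =
      (segCheck (splitP l).headI box && (splitP l).tail.all fun s => segCheck s PySem.Set.empty) := by
  induction l with
  | nil => intro box; simp [checkLoop, splitP, segCheck]
  | cons c rest ih =>
    intro box
    by_cases hc : ('a' ≤ c && c ≤ 'z') = true
    · have hcp : c ≠ ')' := fun h => by subst h; exact absurd hc (by decide)
      have hsp : splitP (c :: rest) = (c :: (splitP rest).headI) :: (splitP rest).tail := by
        simp [splitP, hcp]
      rw [hsp, List.headI_cons, List.tail_cons]
      by_cases hm : c ∈ box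
      · rw [show checkLoop (c :: rest) box = false by
              simp [checkLoop, isIn_single_lower, hc, hm]]
        rw [show segCheck (c :: (splitP rest).headI) box = false by
              simp [segCheck, hc, hm]]
        simp
      · rw [show checkLoop (c :: rest) box = checkLoop rest (PySem.Set.add box c) by
              simp [checkLoop, isIn_single_lower, hc, hm]]
        rw [show segCheck (c :: (splitP rest).headI) box
              = segCheck (splitP rest).headI (PySem.Set.add box c) by
              simp [segCheck, hc, hm]]
        exact ih _
    · rw [Bool.not_eq_true] at hc
      by_cases hcp : c = ')'
      · subst hcp
        have hsp : splitP (')' :: rest) = [] :: splitP rest := by simp [splitP]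
        rw [show checkLoop (')' :: rest) box = checkLoop rest PySem.Set.empty by
              simp [checkLoop, isIn_single_lower]]
        rw [hsp, List.headI_cons, List.tail_cons]
        rw [show segCheck ([] : List Char) box = true from rfl, Bool.true_and]
        rw [ih, ← splitP_head_tail rest, List.all_cons]
        simp only [List.headI_cons, List.tail_cons]
      · have hsp : splitP (c :: rest) = (c :: (splitP rest).headI) :: (splitP rest).tail := by
          simp [splitP, hcp]
        rw [show checkLoop (c :: rest) box = checkLoop rest box by
              simp [checkLoop, isIn_single_lower, hc, hcp]]
        rw [hsp, List.headI_cons, List.tail_cons]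
        rw [show segCheck (c :: (splitP rest).headI) box = segCheck (splitP rest).headI box by
              simp [segCheck, hc]]
        exact ih box

-- |set(xs)| = |xs| iff xs has no duplicates
theorem len_ofList_eq_iff (xs : List Char) :
    (PySem.Set.ofList xs).length = xs.length ↔ xs.Nodup := by
  induction xs using List.reverseRecOn with
  | nil => simp
  | append_singleton ys y ih =>
    rw [PySem.Set.ofList_append_singleton, PySem.Set.add]
    by_cases hcon : (PySem.Set.ofList ys).contains y = true
    · rw [if_pos hcon]
      have hle := PySem.Set.length_ofList_le ys
      have hy : y ∈ ys := (PySem.Set.mem_ofList ys y).mp ((PySem.Set.contains_iff _ y).mp hcon)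
      constructor
      · intro h; simp only [List.length_append, List.length_cons, List.length_nil] at h; omega
      · intro h
        rw [List.nodup_append] at h
        exact absurd (h.2.2 y hy y (by simp)) (by simp)
    · rw [if_neg hcon]
      have hy : y ∉ ys := by
        intro h
        exact hcon ((PySem.Set.contains_iff _ y).mpr ((PySem.Set.mem_ofList ys y).mpr h))
      simp only [List.length_append, List.length_cons, List.length_nil]
      rw [List.nodup_append]
      constructor
      · intro h
        have hlen : (PySem.Set.ofList ys).length = ys.length := by omega
        refine ⟨ih.mp hlen, by simp, ?_⟩
        intro a ha b hb
        rw [List.mem_singleton] at hb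
        subst hb
        exact fun e => hy (e ▸ ha)
      · rintro ⟨hnd, -, -⟩
        have := ih.mpr hnd; omega

theorem segCheck_empty_eq (seg : List Char) :
    segCheck seg PySem.Set.empty =
      (((lettersOf seg).length : Int) == PySem.Set.len (PySem.Set.ofList (lettersOf seg))) := by
  rw [Bool.eq_iff_iff, segCheck_iff, beq_iff_eq]
  simp only [PySem.Set.len, Nat.cast_inj]
  constructor
  · rintro ⟨hnd, -⟩
    exact ((len_ofList_eq_iff _).mpr hnd).symm
  · intro h
    exact ⟨(len_ofList_eq_iff _).mp h.symm, fun c _ hc => List.not_mem_nil hc⟩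

-- ===== VERDICT (by name: the statement is the Claim_ definition above) =====
theorem check_spec : Claim_equal_check := by
  intro S _
  unfold Spec_check check check_alt
  have hsplit : PySem.Str.split? S ")" =
      some ((PySem.Chars.splitOn S.toList [')']).map String.ofList) := by
    rw [PySem.Str.split?]
    simp [PySem.Chars.split?, show (")" : String).toList = [')'] from rfl]
  rw [hsplit, Option.getD_some, splitOn_eq_splitP, checkLoop_eq_segs]
  have hall : ∀ xs : List (List Char),
      ((xs.map String.ofList).all fun seg =>
        let letters := seg.toList.filter (fun c => 'a' ≤ c && c ≤ 'z')
        ((letters.length : Int) == PySem.Set.len (PySem.Set.ofList letters)))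
      = xs.all fun s => segCheck s PySem.Set.empty := by
    intro xs
    induction xs with
    | nil => rfl
    | cons a as ihh =>
      simp only [List.map_cons, List.all_cons, ihh]
      congr 1
      rw [segCheck_empty_eq]
      simp [String.toList_ofList, lettersOf]
  rw [hall, ← splitP_head_tail S.toList]
  simp only [List.all_cons, List.headI_cons, List.tail_cons]
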